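-- pv_equiv track=rewrite | github.com/alpoi/codesignal | longest_word.py | solution
-- ===== SOURCE A (Python) =====
-- def solution(text):
--
--     words = ['']
--
--     for char in text:
--         if char.isalpha():
--             words[-1] += char
--         elif words[-1] != '':
--             words.append('')
--         else:
--             pass
--
--     lengths = [len(word) for word in words]
--     k = lengths.index(max(lengths))
--
--     return words[k]
-- ===== SOURCE B (Python) =====
-- def solution(text):
--     best = ''
--     cur = ''
--     for char in text:
--         if char.isalpha():
--             cur += char
--         else:
--             if len(cur) > len(best):
--                 best = cur
--             cur = ''
--     if len(cur) > len(best):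
--         best = cur
--     return best
-- ===== Notes on version B (the rewrite author's own statement) =====
-- stated objective: faster
-- what changed: B replaces A's build-the-whole-word-list then max(lengths)/index scheme with a single online pass that keeps only the current run and the first strictly-longest run seen so far; A's words[-1] += char rebuilds the last string each character (quadratic in run length), B's plain cur += char appends in amortized constant time.
import Mathlib
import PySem

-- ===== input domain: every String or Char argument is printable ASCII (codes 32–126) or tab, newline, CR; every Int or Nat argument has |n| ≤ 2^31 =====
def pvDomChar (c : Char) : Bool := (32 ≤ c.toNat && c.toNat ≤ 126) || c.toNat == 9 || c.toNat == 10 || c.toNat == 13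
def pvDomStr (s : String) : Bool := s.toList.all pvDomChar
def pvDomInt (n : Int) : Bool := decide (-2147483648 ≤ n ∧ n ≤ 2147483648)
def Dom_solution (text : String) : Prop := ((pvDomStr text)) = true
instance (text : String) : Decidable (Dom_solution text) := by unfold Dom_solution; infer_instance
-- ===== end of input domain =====

-- B replaces A's build-all-words-then-index(max(lengths)) scheme with one online pass that
-- keeps only the current run and the best (first strictly longest) run seen so far
-- (measured faster: A's words[-1] += char rebuilds the last string per character).

-- ===== PORT A =====
-- words[-1] += char  (replace the last word of the list by itself with char appended)
def pvAppendLast (ws : List (List Char)) (c : Char) : List (List Char) :=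
  ws.dropLast ++ [ws.getLastD [] ++ [c]]

def pvStepA (ws : List (List Char)) (c : Char) : List (List Char) :=
  if PySem.Chars.isalpha c then pvAppendLast ws c
  else if ws.getLastD [] ≠ [] then ws ++ [[]]
  else ws

def solution (text : String) : String :=
  let words := text.toList.foldl pvStepA [[]]
  let lengths := words.map (·.length)
  -- words is always nonempty, so max(lengths) and lengths.index never raise;
  -- the `none` arms below are unreachable.
  match PySem.List.max? lengths (fun x => x) with
  | some m =>
    match PySem.List.index? lengths m with
    | some k => String.ofList (words.getD k [])
    | none => ""
  | none => ""

-- ===== PORT B =====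
-- if len(cur) > len(best): best = cur
def pvUpd (best cur : List Char) : List Char :=
  if cur.length > best.length then cur else best

def pvStepB (s : List Char × List Char) (c : Char) : List Char × List Char :=
  if PySem.Chars.isalpha c then (s.1, s.2 ++ [c])
  else (pvUpd s.1 s.2, [])

def solution_alt (text : String) : String :=
  let s := text.toList.foldl pvStepB ([], [])
  String.ofList (pvUpd s.1 s.2)

-- ===== PRECONDITION & SPEC =====
def Spec_solution (text : String) (out : String) : Prop := out = solution_alt text
instance (text : String) (out : String) : Decidable (Spec_solution text out) := by unfold Spec_solution; infer_instance

-- ===== CLAIM (what is proved, stated in full; the proofs are below) =====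
def Claim_equal_solution : Prop := ∀ (text : String), Dom_solution text → Spec_solution text (solution text)

-- ===== LEMMAS AND PROOFS =====

-- first word of maximal length ("first maximum": strictly-longer-wins scan from the right)
def pvFm : List (List Char) → List Char
  | [] => []
  | w :: t => if (pvFm t).length > w.length then pvFm t else w

def pvMaxL (ws : List (List Char)) : Nat := (ws.map (·.length)).foldr max 0

lemma pvLen_fm (ws : List (List Char)) : (pvFm ws).length = pvMaxL ws := by
  induction ws with
  | nil => rfl
  | cons w t ih =>
    have hm : pvMaxL (w :: t) = max w.length (pvMaxL t) := by simp [pvMaxL]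
    rw [hm]
    simp only [pvFm]
    by_cases h : (pvFm t).length > w.length
    · rw [if_pos h]; omega
    · rw [if_neg h]; omega

lemma pvFoldl_upd (ws : List (List Char)) (b : List Char) :
    ws.foldl pvUpd b = if b.length < pvMaxL ws then pvFm ws else b := by
  induction ws generalizing b with
  | nil => simp [pvMaxL]
  | cons w t ih =>
    have hm : pvMaxL (w :: t) = max w.length (pvMaxL t) := by simp [pvMaxL]
    simp only [List.foldl, pvUpd]
    by_cases h1 : w.length > b.length
    · rw [if_pos h1, ih]
      by_cases h2 : w.length < pvMaxL t
      · rw [if_pos h2, hm]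
        have : pvFm (w :: t) = pvFm t := by
          simp only [pvFm]; rw [if_pos (by rw [pvLen_fm]; omega)]
        rw [this, if_pos (by omega)]
      · rw [if_neg h2, hm]
        have : pvFm (w :: t) = w := by
          simp only [pvFm]; rw [if_neg (by rw [pvLen_fm]; omega)]
        rw [this, if_pos (by omega)]
    · rw [if_neg h1, ih, hm]
      by_cases h2 : b.length < pvMaxL t
      · have hfm : pvFm (w :: t) = pvFm t := by
          simp only [pvFm]; rw [pvLen_fm, if_pos (by omega)]
        rw [if_pos h2, if_pos (by omega), hfm]
      · rw [if_neg h2, if_neg (by omega)]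

lemma pvFoldl_upd_nil (ws : List (List Char)) : ws.foldl pvUpd [] = pvFm ws := by
  rw [pvFoldl_upd]
  by_cases h : 0 < pvMaxL ws
  · simp [h]
  · rw [if_neg (by omega)]
    -- maximal length 0: pvFm ws has length 0, hence is []
    have := pvLen_fm ws
    have : (pvFm ws).length = 0 := by omega
    exact (List.length_eq_zero_iff.mp this).symm

lemma pvMaxL_le (ws : List (List Char)) (n : Nat) (h : ∀ w ∈ ws, w.length ≤ n) :
    pvMaxL ws ≤ n := by
  induction ws with
  | nil => simp [pvMaxL]
  | cons w t ih =>
    have := h w (by simp)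
    have := ih (fun x hx => h x (by simp [hx]))
    simp only [pvMaxL, List.map, List.foldr] at *
    omega

-- pvFm really is the FIRST word of maximal length
lemma pvFm_first (ws : List (List Char)) (k : Nat) (hk : k < ws.length)
    (hmax : ∀ w ∈ ws, w.length ≤ ws[k].length)
    (hfirst : ∀ j (hj : j < ws.length), j < k → ws[j].length ≠ ws[k].length) :
    pvFm ws = ws[k] := by
  induction ws generalizing k with
  | nil => simp at hk
  | cons w t ih =>
    match k with
    | 0 =>
      simp only [List.getElem_cons_zero] at hmax ⊢
      have hle : pvMaxL t ≤ w.length :=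
        pvMaxL_le t w.length (fun x hx => hmax x (by simp [hx]))
      simp only [pvFm]
      rw [pvLen_fm, if_neg (by omega)]
    | k + 1 =>
      simp only [List.getElem_cons_succ] at hmax ⊢
      have hk' : k < t.length := by simpa using hk
      have hwne : w.length ≠ t[k].length := by
        have := hfirst 0 (by simp) (by omega); simpa using this
      have hwlt : w.length < t[k].length := by
        have := hmax w (by simp); omega
      have iht : pvFm t = t[k] := by
        apply ih k hk' (fun x hx => hmax x (by simp [hx]))
        intro j hj hjk
        have := hfirst (j + 1) (by simpa using hj) (by omega)
        simpa using this
      simp only [pvFm, iht]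
      rw [if_pos (by omega)]

-- A's max/index/lookup scheme computes pvFm
lemma pvAres_eq_fm (ws : List (List Char)) (hne : ws ≠ []) :
    (match PySem.List.max? (ws.map (·.length)) (fun x => x) with
     | some m =>
       match PySem.List.index? (ws.map (·.length)) m with
       | some k => String.ofList (ws.getD k [])
       | none => ""
     | none => "") = String.ofList (pvFm ws) := by
  set ls := ws.map (·.length) with hls
  have hlsne : ls ≠ [] := by simp [hls, hne]
  obtain ⟨m, hm⟩ : ∃ m, PySem.List.max? ls (fun x => x) = some m := by
    cases h : PySem.List.max? ls (fun x => x) with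
    | none => exact absurd ((PySem.List.max?_eq_none_iff _ _).mp h) hlsne
    | some m => exact ⟨m, rfl⟩
  have hmem : m ∈ ls := PySem.List.max?_mem hm
  have hmax : ∀ y ∈ ls, y ≤ m := PySem.List.max?_isMax hm
  obtain ⟨k, hk⟩ : ∃ k, PySem.List.index? ls m = some k := by
    cases h : PySem.List.index? ls m with
    | none => exact absurd hmem ((PySem.List.index?_eq_none_iff _ _).mp h)
    | some k => exact ⟨k, rfl⟩
  obtain ⟨hklt, hkm, hbefore⟩ := PySem.List.getElem_of_index?_eq_some hk
  rw [hm]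
  simp only [hk]
  have hklt' : k < ws.length := by simpa [hls] using hklt
  have hkm' : ws[k].length = m := by
    have := hkm; simp only [hls] at this; simpa using this
  have : pvFm ws = ws[k] := by
    apply pvFm_first ws k hklt'
    · intro w hw
      have := hmax w.length (by simp [hls]; exact ⟨w, hw, rfl⟩)
      omega
    · intro j hjlt hjk
      have := hbefore j hjk
      simp only [hls] at this
      rw [List.getElem_map] at this
      rw [hkm']
      exact this
  rw [this, List.getD_eq_getElem ws [] hklt']

-- the A ↔ B loop invariant: A's word list is (completed words) ++ [current run],
-- B's best is the strict-longest fold over the completed words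
lemma pvLoop (cs : List Char) (d : List (List Char)) (cur : List Char) :
    ∃ d' cur',
      cs.foldl pvStepA (d ++ [cur]) = d' ++ [cur'] ∧
      cs.foldl pvStepB (d.foldl pvUpd [], cur) = (d'.foldl pvUpd [], cur') := by
  induction cs generalizing d cur with
  | nil => exact ⟨d, cur, rfl, rfl⟩
  | cons c cs ih =>
    simp only [List.foldl]
    by_cases hc : PySem.Chars.isalpha c = true
    · have hA : pvStepA (d ++ [cur]) c = d ++ [cur ++ [c]] := by
        simp [pvStepA, hc, pvAppendLast]
      have hB : pvStepB (d.foldl pvUpd [], cur) c = (d.foldl pvUpd [], cur ++ [c]) := by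
        simp [pvStepB, hc]
      rw [hA, hB]; exact ih d (cur ++ [c])
    · by_cases hcur : cur = []
      · have hA : pvStepA (d ++ [cur]) c = d ++ [cur] := by
          simp [pvStepA, hc, hcur]
        have hB : pvStepB (d.foldl pvUpd [], cur) c = (d.foldl pvUpd [], cur) := by
          simp [pvStepB, hc, hcur, pvUpd]
        rw [hA, hB]; exact ih d cur
      · have hA : pvStepA (d ++ [cur]) c = (d ++ [cur]) ++ [[]] := by
          simp [pvStepA, hc, hcur]
        have hB : pvStepB (d.foldl pvUpd [], cur) c = ((d ++ [cur]).foldl pvUpd [], []) := by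
          simp [pvStepB, hc, List.foldl_append]
        rw [hA, hB]; exact ih (d ++ [cur]) []

-- ===== VERDICT (by name: the statement is the Claim_ definition above) =====
theorem solution_spec : Claim_equal_solution := by
  intro text _
  unfold Spec_solution solution solution_alt
  obtain ⟨d', cur', hA, hB⟩ := pvLoop text.toList [] []
  simp only [List.nil_append, List.foldl_nil] at hA hB
  rw [hA, hB, pvAres_eq_fm (d' ++ [cur']) (by simp)]
  simp only
  rw [← pvFoldl_upd_nil, List.foldl_append, List.foldl_cons, List.foldl_nil]
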